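-- pv_equiv track=rewrite | github.com/Gatimoro/Leetcode-Solutions | Medium Problems/addMinimum.py | addMinimum
-- ===== SOURCE A (Python) =====
-- def addMinimum(word: str) -> int:
--     abc = ['a','b','c']
--     ads = 0
--     abi = 0
--     i = 0
--     while i < len(word):
--         l = word[i]
--         if l == abc[abi]:
--             i += 1
--         else:
--             ads += 1
--         abi += 1
--         abi %= 3
--     if word[-1] == 'a':
--         return ads + 2
--     elif word[-1] == 'b':
--         return ads + 1
--     return ads
-- ===== SOURCE B (Python) =====
-- def addMinimum(word: str) -> int:
--     count = 1 + sum(1 for prev, cur in zip(word, word[1:]) if cur <= prev)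
--     return 3 * count - len(word)
-- ===== Notes on version B (the rewrite author's own statement) =====
-- stated objective: simpler
-- what changed: Replaces A's simulated while-loop over an expected-letter cursor (abi cycling mod 3, re-testing the same character up to three times) plus a separate last-character fixup with a one-pass group count (count consecutive pairs with cur <= prev) and the closed form 3*count - len(word).
import Mathlib
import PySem

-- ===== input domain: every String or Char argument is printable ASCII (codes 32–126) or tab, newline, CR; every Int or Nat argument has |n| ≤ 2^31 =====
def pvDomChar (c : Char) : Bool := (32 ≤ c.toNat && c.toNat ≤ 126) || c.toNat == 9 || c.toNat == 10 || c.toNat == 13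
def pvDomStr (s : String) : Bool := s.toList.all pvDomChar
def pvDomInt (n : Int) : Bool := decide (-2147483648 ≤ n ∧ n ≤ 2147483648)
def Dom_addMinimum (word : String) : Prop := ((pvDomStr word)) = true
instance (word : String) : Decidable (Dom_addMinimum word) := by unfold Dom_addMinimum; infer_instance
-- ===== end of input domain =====

-- B replaces A's cursor-simulation loop (expected letter abi cycling mod 3, re-testing a
-- character up to three times, plus a last-character fixup) by counting group breaks
-- (cur ≤ prev) in one pass and the closed form 3*count - len; objective: simpler.

-- ===== PORT A =====
-- A's while-loop: i advances only on a match, so it is recursion on the remaining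
-- characters; the loop diverges when a character outside 'abc' is reached (abi cycles
-- forever), so the port uses fuel, `none` = divergence (excluded by Pre_).
def addMinimum_loop (fuel : Nat) (ads : Int) (abi : Nat) (rest : List Char) : Option Int :=
  match fuel, rest with
  | 0, _ => none
  | _ + 1, [] => some ads
  | fuel + 1, l :: rest' =>
      if l = (['a', 'b', 'c'].getD abi 'a') then  -- abi < 3 always (abi %= 3 each turn)
        addMinimum_loop fuel ads ((abi + 1) % 3) rest'
      else
        addMinimum_loop fuel (ads + 1) ((abi + 1) % 3) (l :: rest')

def addMinimum (word : String) : Int :=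
  -- 3*len+1 fuel suffices whenever the Python loop terminates (≤ 3 turns per character)
  let ads := (addMinimum_loop (3 * word.toList.length + 1) 0 0 word.toList).getD 0
  match PySem.Str.pyGet? word (-1) with   -- word[-1]; none = IndexError on "" (outside Pre_)
  | none => ads
  | some l => if l = 'a' then ads + 2 else if l = 'b' then ads + 1 else ads

-- ===== PORT B =====
def addMinimum_alt (word : String) : Int :=
  let cs := word.toList
  let count : Int := 1 + ((cs.zip cs.tail).countP fun pc => pc.2 ≤ pc.1)
  3 * count - cs.length

-- ===== PRECONDITION & SPEC =====
-- Pre_ excludes the empty string (A raises IndexError at word[-1]) and any word with a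
-- character outside {'a','b','c'} (A's while-loop never terminates there).
def Pre_addMinimum (word : String) : Prop :=
  word.toList ≠ [] ∧ word.toList.all (fun c => c = 'a' ∨ c = 'b' ∨ c = 'c')
instance (word : String) : Decidable (Pre_addMinimum word) := by
  unfold Pre_addMinimum; infer_instance

def pvWitness_addMinimum : String := "aabcc"

def Spec_addMinimum (word : String) (out : Int) : Prop := out = addMinimum_alt word
instance (word : String) (out : Int) : Decidable (Spec_addMinimum word out) := by unfold Spec_addMinimum; infer_instance

-- ===== CLAIM (what is proved, stated in full; the proofs are below) =====
def Claim_equal_addMinimum : Prop := ∀ (word : String), Dom_addMinimum word → Pre_addMinimum word → Spec_addMinimum word (addMinimum word)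

-- ===== LEMMAS AND PROOFS =====

-- letter index: 'a' ↦ 0, 'b' ↦ 1, 'c' ↦ 2
def pvIdx (c : Char) : Nat := if c = 'a' then 0 else if c = 'b' then 1 else 2

-- ads added by the loop from cursor abi over the remaining characters
def pvCost (abi : Nat) : List Char → Int
  | [] => 0
  | c :: cs => ((pvIdx c + 3 - abi) % 3 : Nat) + pvCost ((pvIdx c + 1) % 3) cs

lemma addMinimum_loop_spec :
    ∀ (rest : List Char), (∀ c ∈ rest, c = 'a' ∨ c = 'b' ∨ c = 'c') →
    ∀ (abi fuel : Nat) (ads : Int), abi < 3 → 3 * rest.length + 1 ≤ fuel →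
    addMinimum_loop fuel ads abi rest = some (ads + pvCost abi rest) := by
  intro rest
  induction rest with
  | nil =>
      intro _ abi fuel ads _ hf
      obtain ⟨k, rfl⟩ : ∃ k, fuel = k + 1 := ⟨fuel - 1, by omega⟩
      simp [addMinimum_loop, pvCost]
  | cons c cs ih =>
      intro hall abi fuel ads h3 hf
      obtain ⟨k, rfl⟩ : ∃ k, fuel = k + 3 := ⟨fuel - 3, by simp at hf; omega⟩
      have hk : 3 * cs.length + 1 ≤ k := by simp at hf; omega
      have hc : c = 'a' ∨ c = 'b' ∨ c = 'c' := hall c (by simp)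
      have hcs : ∀ x ∈ cs, x = 'a' ∨ x = 'b' ∨ x = 'c' := fun x hx => hall x (by simp [hx])
      interval_cases abi <;> rcases hc with rfl | rfl | rfl <;>
        simp [addMinimum_loop, pvCost, pvIdx] <;>
        rw [ih hcs _ _ _ (by omega) (by omega)] <;> congr 1 <;> ring

-- telescoped value of the loop's tail: last index minus first, minus length, plus 3 per break
lemma pvCost_tail :
    ∀ (cs : List Char) (c : Char), (c = 'a' ∨ c = 'b' ∨ c = 'c') →
    (∀ x ∈ cs, x = 'a' ∨ x = 'b' ∨ x = 'c') →
    pvCost ((pvIdx c + 1) % 3) cs =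
      (pvIdx (cs.getLastD c) : Int) - pvIdx c - cs.length +
        3 * (((c :: cs).zip cs).countP fun pc => pc.2 ≤ pc.1) := by
  intro cs
  induction cs with
  | nil => intro c _ _; simp [pvCost]
  | cons d cs' ih =>
      intro c hc hall
      have hd : d = 'a' ∨ d = 'b' ∨ d = 'c' := hall d (by simp)
      have hcs' : ∀ x ∈ cs', x = 'a' ∨ x = 'b' ∨ x = 'c' := fun x hx => hall x (by simp [hx])
      have step : ((((pvIdx d + 3 - (pvIdx c + 1) % 3) % 3 : Nat)) : Int) =
          (pvIdx d : Int) - pvIdx c - 1 + 3 * (if d ≤ c then 1 else 0) := by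
        rcases hc with rfl | rfl | rfl <;> rcases hd with rfl | rfl | rfl <;> decide
      have hzip : ((c :: d :: cs').zip (d :: cs')) = (c, d) :: ((d :: cs').zip cs') := rfl
      simp only [pvCost, List.getLastD_cons, hzip, List.countP_cons, List.length_cons,
        ih d hd hcs']
      rw [step]
      by_cases h : d ≤ c <;> simp [h] <;> ring

theorem addMinimum_spec : Claim_equal_addMinimum := by
  intro word _ hpre
  obtain ⟨hne, hall'0⟩ := hpre
  have hall : ∀ c ∈ word.toList, c = 'a' ∨ c = 'b' ∨ c = 'c' := by
    simpa using hall'0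
  obtain ⟨c, cs, hw⟩ : ∃ c cs, word.toList = c :: cs := by
    cases h : word.toList with
    | nil => exact absurd h hne
    | cons a l => exact ⟨a, l, rfl⟩
  have hall' : ∀ x ∈ c :: cs, x = 'a' ∨ x = 'b' ∨ x = 'c' := by rw [← hw]; exact hall
  have hc : c = 'a' ∨ c = 'b' ∨ c = 'c' := hall' c (by simp)
  have hcs : ∀ x ∈ cs, x = 'a' ∨ x = 'b' ∨ x = 'c' := fun x hx => hall' x (by simp [hx])
  have hloop := addMinimum_loop_spec (c :: cs) hall' 0 (3 * (c :: cs).length + 1) 0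
    (by omega) (by omega)
  have hlast : PySem.Str.pyGet? word (-1) = some (cs.getLastD c) := by
    simp [PySem.Str.pyGet?, PySem.List.pyGet?_neg_one, hw, List.getLast?_cons]
  have hcost0 : pvCost 0 (c :: cs) = (pvIdx c : Int) + pvCost ((pvIdx c + 1) % 3) cs := by
    rcases hc with rfl | rfl | rfl <;> simp [pvCost, pvIdx]
  have hlm : cs.getLastD c = 'a' ∨ cs.getLastD c = 'b' ∨ cs.getLastD c = 'c' := by
    rcases List.mem_cons.mp List.getLastD_mem_cons with h | h
    · rw [h]; exact hc
    · exact hcs _ h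
  unfold Spec_addMinimum addMinimum addMinimum_alt
  rw [hw, hlast, hloop, hcost0, pvCost_tail cs c hc hcs]
  rcases hlm with hl | hl | hl <;>
    rw [hl] <;>
    simp [pvIdx, List.tail] <;> ring
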